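-- pv_equiv track=rewrite | github.com/liuzijian625/TransferLearning | main.py | data_to_people
-- ===== SOURCE A (Python) =====
-- def data_to_people(people_num, datas, labels):
--     """拼接数据，获取每个人对应的数据，用于被试独立"""
--     peoples_data_list_version = []
--     peoples_label_list_version = []
--     for i in range(len(datas)):
--         if i < people_num:
--             peoples_data_list_version.append([datas[i]])
--             peoples_label_list_version.append([labels[i]])
--         else:
--             peoples_data_list_version[i % 15].append(datas[i])
--             peoples_label_list_version[i % 15].append(labels[i])
--     peoples_data = []
--     peoples_label = []
--     for i in range(people_num):
--         people_data = []
--         people_label = []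
--         for j in range(len(peoples_data_list_version[i])):
--             for k in range(len(peoples_data_list_version[i][j])):
--                 people_data.append(peoples_data_list_version[i][j][k])
--                 people_label.append(peoples_label_list_version[i][j][k])
--         peoples_data.append(people_data)
--         peoples_label.append(people_label)
--     return peoples_data, peoples_label
-- ===== SOURCE B (Python) =====
-- def data_to_people(people_num, datas, labels):
--     """拼接数据，获取每个人对应的数据，用于被试独立"""
--     def person(p):
--         data_row, label_row = [], []
--         for i in [p] + [i for i in range(people_num, len(datas)) if i % 15 == p]:
--             for x, y in zip(datas[i], labels[i]):
--                 data_row.append(x)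
--                 label_row.append(y)
--         return data_row, label_row
--     people = [person(p) for p in range(people_num)]
--     return [d for d, _ in people], [l for _, l in people]
-- ===== Notes on version B (the rewrite author's own statement) =====
-- stated objective: simpler
-- what changed: B builds each person's concatenated rows directly in one person-major pass (explicit index list per person, rows paired with zip), replacing A's index-major construction of intermediate per-person chunk lists followed by a triple-nested element-by-element flatten.
import Mathlib
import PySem

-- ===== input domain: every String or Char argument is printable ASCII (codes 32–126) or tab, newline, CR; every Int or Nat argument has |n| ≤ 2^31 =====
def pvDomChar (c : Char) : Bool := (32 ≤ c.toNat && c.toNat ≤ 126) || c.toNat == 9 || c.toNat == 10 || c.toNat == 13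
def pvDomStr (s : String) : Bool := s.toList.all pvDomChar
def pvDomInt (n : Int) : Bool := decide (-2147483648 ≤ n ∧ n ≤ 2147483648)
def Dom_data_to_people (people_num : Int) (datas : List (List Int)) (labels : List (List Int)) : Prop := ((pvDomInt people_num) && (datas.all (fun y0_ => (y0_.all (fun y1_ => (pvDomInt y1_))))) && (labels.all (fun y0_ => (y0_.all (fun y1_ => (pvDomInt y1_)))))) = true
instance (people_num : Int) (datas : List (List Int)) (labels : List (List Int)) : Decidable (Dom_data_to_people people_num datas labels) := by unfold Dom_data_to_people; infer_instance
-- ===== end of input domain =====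

-- B builds each person's concatenated rows directly in one person-major pass (zip pairing rows),
-- replacing A's index-major intermediate chunk lists plus triple-nested flatten ('simpler').

-- ===== PORT A =====
-- Literal transliteration of A. Loop indices from range(...) are nonnegative, so 'i.toNat'
-- in the modify index is exact; list indexing uses pyGetD, whose default is never reached
-- under Pre_ (Python raises exactly on the inputs Pre_ excludes).
def data_to_people (people_num : Int) (datas : List (List Int)) (labels : List (List Int)) : List (List Int) × List (List Int) :=
  let s1 := (PySem.List.pyRange 0 (datas.length : Int) 1).foldl (fun st i =>
      if i < people_num then
        (st.1 ++ [[PySem.List.pyGetD datas i []]], st.2 ++ [[PySem.List.pyGetD labels i []]])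
      else
        (st.1.modify (i.toNat % 15) (fun c => c ++ [PySem.List.pyGetD datas i []]),
         st.2.modify (i.toNat % 15) (fun c => c ++ [PySem.List.pyGetD labels i []])))
    ([], [])
  (PySem.List.pyRange 0 people_num 1).foldl (fun out i =>
      let chunks_d := PySem.List.pyGetD s1.1 i []
      let chunks_l := PySem.List.pyGetD s1.2 i []
      let pp := (PySem.List.pyRange 0 (chunks_d.length : Int) 1).foldl (fun pp j =>
          let cd := PySem.List.pyGetD chunks_d j []
          let cl := PySem.List.pyGetD chunks_l j []
          (PySem.List.pyRange 0 (cd.length : Int) 1).foldl (fun pp k =>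
              (pp.1 ++ [PySem.List.pyGetD cd k 0], pp.2 ++ [PySem.List.pyGetD cl k 0])) pp)
        ([], [])
      (out.1 ++ [pp.1], out.2 ++ [pp.2]))
    ([], [])

-- ===== PORT B =====
-- helper 'person' of Source B
def pvPerson (people_num : Int) (datas : List (List Int)) (labels : List (List Int)) (p : Int) : List Int × List Int :=
  ([p] ++ (PySem.List.pyRange people_num (datas.length : Int) 1).filter
        (fun i => PySem.Int.mod i 15 == p)).foldl
    (fun st i =>
      ((PySem.List.pyGetD datas i []).zip (PySem.List.pyGetD labels i [])).foldl
        (fun st xy => (st.1 ++ [xy.1], st.2 ++ [xy.2])) st)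
    ([], [])

def data_to_people_alt (people_num : Int) (datas : List (List Int)) (labels : List (List Int)) : List (List Int) × List (List Int) :=
  let people := (PySem.List.pyRange 0 people_num 1).map (pvPerson people_num datas labels)
  (people.map (·.1), people.map (·.2))

-- ===== PRECONDITION & SPEC =====
-- Pre_ is exactly the set of inputs on which the Python A returns normally: A raises IndexError
-- when people_num exceeds len(datas), when some row index i ≥ people_num has i % 15 ≥ people_num
-- (including people_num ≤ 0 with nonempty datas), when labels is shorter than datas, or when some
-- labels[i] is shorter than datas[i].
def Pre_data_to_people (people_num : Int) (datas : List (List Int)) (labels : List (List Int)) : Prop :=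
  people_num ≤ (datas.length : Int) ∧ datas.length ≤ labels.length ∧
  (∀ i : Nat, i < datas.length → people_num ≤ (i : Int) → PySem.Int.mod (i : Int) 15 < people_num) ∧
  (∀ i : Nat, i < datas.length → (datas.getD i []).length ≤ (labels.getD i []).length)
instance (people_num : Int) (datas : List (List Int)) (labels : List (List Int)) : Decidable (Pre_data_to_people people_num datas labels) := by unfold Pre_data_to_people; infer_instance

def pvWitness_data_to_people : Int × List (List Int) × List (List Int) :=
  (2, [[1], [2, 3]], [[10], [20, 30]])

def Spec_data_to_people (people_num : Int) (datas : List (List Int)) (labels : List (List Int)) (out : List (List Int) × List (List Int)) : Prop := out = data_to_people_alt people_num datas labels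
instance (people_num : Int) (datas : List (List Int)) (labels : List (List Int)) (out : List (List Int) × List (List Int)) : Decidable (Spec_data_to_people people_num datas labels out) := by unfold Spec_data_to_people; infer_instance

-- ===== CLAIM (what is proved, stated in full; the proofs are below) =====
def Claim_equal_data_to_people : Prop := ∀ (people_num : Int) (datas : List (List Int)) (labels : List (List Int)), Dom_data_to_people people_num datas labels → Pre_data_to_people people_num datas labels → Spec_data_to_people people_num datas labels (data_to_people people_num datas labels)

-- ===== LEMMAS AND PROOFS =====

-- general helpers

theorem pv_map_snd_zip (l1 l2 : List Int) (h : l1.length ≤ l2.length) :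
    (l1.zip l2).map Prod.snd = l2.take l1.length := by
  induction l1 generalizing l2 with
  | nil => simp
  | cons a t ih =>
    cases l2 with
    | nil => simp at h
    | cons b t2 => simp at h ⊢; exact ih t2 h

theorem pv_map_range_getD (l : List Int) (m : Nat) (h : m ≤ l.length) :
    (List.range m).map (fun k => l.getD k 0) = l.take m := by
  apply List.ext_getElem
  · simp; omega
  · intro i h1 h2
    simp [List.getD_eq_getElem?_getD,
      List.getElem?_eq_getElem (show i < l.length by simp at h1; omega)]

theorem pv_map_pyRange_getD (l : List Int) (m : Nat) (h : m ≤ l.length) :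
    (PySem.List.pyRange 0 (m : Int) 1).map (fun k => PySem.List.pyGetD l k 0) = l.take m := by
  rw [PySem.List.pyRange_one, List.map_map]
  have : ((fun k => PySem.List.pyGetD l k 0) ∘ fun k : Nat => (0 : Int) + ↑k) = fun k : Nat => l.getD k 0 := by
    funext k
    simp
  simp only [Int.sub_zero, Int.toNat_natCast, this]
  exact pv_map_range_getD l m h

theorem pv_pyGetD_map {α β : Type} (l : List α) (f : α → β) (j : Int) (d : β) (d' : α)
    (h0 : 0 ≤ j) (h : j < (l.length : Int)) :
    PySem.List.pyGetD (l.map f) j d = f (PySem.List.pyGetD l j d') := by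
  rw [PySem.List.pyGetD_eq_getElem _ _ h0 (by simpa using h),
      PySem.List.pyGetD_eq_getElem _ _ h0 h]
  simp

theorem pv_fold_pairs (idx : List Int) (F G : Int → List Int) :
    idx.foldl (fun st i => (st.1 ++ F i, st.2 ++ G i)) ([], []) = (idx.flatMap F, idx.flatMap G) := by
  rw [PySem.List.foldl_prod_mk (f := fun a i => a ++ F i) (g := fun a i => a ++ G i),
      PySem.List.foldl_append_eq_flatMap, PySem.List.foldl_append_eq_flatMap]
  simp

theorem pv_inner_flatten (cd cl : List Int) (pp : List Int × List Int) (h : cd.length ≤ cl.length) :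
    (PySem.List.pyRange 0 (cd.length : Int) 1).foldl
      (fun pp k => (pp.1 ++ [PySem.List.pyGetD cd k 0], pp.2 ++ [PySem.List.pyGetD cl k 0])) pp
    = (pp.1 ++ cd, pp.2 ++ cl.take cd.length) := by
  rw [show pp = (pp.1, pp.2) from rfl,
      PySem.List.foldl_prod_mk (f := fun a k => a ++ [PySem.List.pyGetD cd k 0])
        (g := fun a k => a ++ [PySem.List.pyGetD cl k 0]),
      PySem.List.foldl_append_singleton_eq_map, PySem.List.foldl_append_singleton_eq_map,
      pv_map_pyRange_getD cd cd.length le_rfl, pv_map_pyRange_getD cl cd.length h,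
      List.take_length]

theorem pv_zip_fold (cd cl : List Int) (st : List Int × List Int) (h : cd.length ≤ cl.length) :
    (cd.zip cl).foldl (fun st xy => (st.1 ++ [xy.1], st.2 ++ [xy.2])) st
    = (st.1 ++ cd, st.2 ++ cl.take cd.length) := by
  rw [show st = (st.1, st.2) from rfl,
      PySem.List.foldl_prod_mk (f := fun a (xy : Int × Int) => a ++ [xy.1])
        (g := fun a (xy : Int × Int) => a ++ [xy.2]),
      PySem.List.foldl_append_singleton_eq_map, PySem.List.foldl_append_singleton_eq_map]
  have h1 : (cd.zip cl).map (fun xy => xy.1) = cd := List.map_fst_zip h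
  have h2 : (cd.zip cl).map (fun xy => xy.2) = cl.take cd.length := pv_map_snd_zip cd cl h
  rw [h1, h2]


theorem pv_modify_map {α : Type} (P : Int) (g : Int → α) (f : α → α) (q : Nat) :
    ((PySem.List.pyRange 0 P 1).map g).modify q f
    = (PySem.List.pyRange 0 P 1).map (fun x => if x = (q : Int) then f (g x) else g x) := by
  apply List.ext_getElem
  · simp [List.length_modify]
  · intro k h1 h2
    rw [List.getElem_modify]
    have hk : k < (PySem.List.pyRange 0 P 1).length := by simpa using h2
    simp only [List.getElem_map, PySem.List.getElem_pyRange_one 0 P k hk]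
    by_cases hqk : q = k
    · subst hqk; simp
    · rw [if_neg hqk, if_neg (by omega)]

theorem pv_phase2 (rows : List (List Int)) (P : Int) (hP : 0 < P) (m : Nat) :
    P ≤ (m : Int) → (∀ i : Nat, i < m → P ≤ (i : Int) → PySem.Int.mod (i : Int) 15 < P) →
    (PySem.List.pyRange P (m : Int) 1).foldl
        (fun l i => l.modify (i.toNat % 15) (fun c => c ++ [PySem.List.pyGetD rows i []]))
        ((PySem.List.pyRange 0 P 1).map (fun q => [PySem.List.pyGetD rows q []]))
    = (PySem.List.pyRange 0 P 1).map (fun q =>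
        (q :: (PySem.List.pyRange P (m : Int) 1).filter (fun i => PySem.Int.mod i 15 == q)).map
          (fun i => PySem.List.pyGetD rows i [])) := by
  intro hm hmod
  have hm' : P.toNat ≤ m := by omega
  clear hm
  induction m, hm' using Nat.le_induction with
  | base =>
    have hPP : ((P.toNat : Nat) : Int) = P := by omega
    rw [hPP, PySem.List.pyRange_one_eq_nil le_rfl]
    simp
  | succ n hn ih =>
    have hPn : P ≤ (n : Int) := by omega
    have hsplit : ((n + 1 : Nat) : Int) = (n : Int) + 1 := by push_cast; ring
    rw [hsplit, PySem.List.pyRange_one_succ_right hPn, List.foldl_append,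
        ih (fun i h1 h2 => hmod i (by omega) h2)]
    have hq : PySem.Int.mod (n : Int) 15 = ((n % 15 : Nat) : Int) := by
      have := PySem.Int.mod_natCast n 15
      push_cast at this ⊢
      omega
    simp only [List.foldl_cons, List.foldl_nil, Int.toNat_natCast]
    rw [pv_modify_map]
    congr 1
    funext x
    rw [List.filter_append]
    by_cases hx : x = ((n % 15 : Nat) : Int)
    · rw [if_pos hx]
      have : (PySem.List.pyRange P (n:Int) 1).filter (fun i => PySem.Int.mod i 15 == x) ++
          List.filter (fun i => PySem.Int.mod i 15 == x) [(n:Int)]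
          = (PySem.List.pyRange P (n:Int) 1).filter (fun i => PySem.Int.mod i 15 == x) ++ [(n:Int)] := by
        simp [List.filter, hx]
      rw [this]
      simp
    · rw [if_neg hx]
      have : List.filter (fun i => PySem.Int.mod i 15 == x) [(n:Int)] = [] := by
        simp only [List.filter_cons, List.filter_nil, hq, beq_iff_eq]
        rw [if_neg (fun h => hx h.symm)]
      rw [this, List.append_nil]

-- row-length condition lifted to Int indices
theorem pv_row_le (datas labels : List (List Int))
    (hrow : ∀ i : Nat, i < datas.length → (datas.getD i []).length ≤ (labels.getD i []).length)
    (i : Int) (h0 : 0 ≤ i) (h1 : i < (datas.length : Int)) :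
    (PySem.List.pyGetD datas i []).length ≤ (PySem.List.pyGetD labels i []).length := by
  rw [PySem.List.pyGetD_of_nonneg datas [] h0, PySem.List.pyGetD_of_nonneg labels [] h0]
  exact hrow i.toNat (by omega)

-- B's person helper computed in closed form
theorem pv_person_eq (P : Int) (datas labels : List (List Int)) (p : Int)
    (hP : 0 ≤ P) (hp0 : 0 ≤ p)
    (hrow : ∀ i : Nat, i < datas.length → (datas.getD i []).length ≤ (labels.getD i []).length)
    (hpn : p < (datas.length : Int)) :
    pvPerson P datas labels p =
      ((p :: (PySem.List.pyRange P (datas.length : Int) 1).filter (fun i => PySem.Int.mod i 15 == p)).flatMap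
          (fun i => PySem.List.pyGetD datas i []),
       (p :: (PySem.List.pyRange P (datas.length : Int) 1).filter (fun i => PySem.Int.mod i 15 == p)).flatMap
          (fun i => (PySem.List.pyGetD labels i []).take (PySem.List.pyGetD datas i []).length)) := by
  unfold pvPerson
  rw [List.singleton_append]
  rw [PySem.List.foldl_congr_mem _ _
      (fun st i => (st.1 ++ PySem.List.pyGetD datas i [],
        st.2 ++ (PySem.List.pyGetD labels i []).take (PySem.List.pyGetD datas i []).length)) _ ?_]
  · exact pv_fold_pairs _ _ _
  · intro st i hi
    have hb : 0 ≤ i ∧ i < (datas.length : Int) := by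
      rcases List.mem_cons.mp hi with h | h
      · omega
      · have := PySem.List.mem_pyRange_one.mp (List.mem_of_mem_filter h)
        omega
    exact pv_zip_fold _ _ _ (pv_row_le datas labels hrow i hb.1 hb.2)

-- A computed in closed form: chunk flattening
theorem pv_chunks_flatten (datas labels : List (List Int)) (idx : List Int)
    (hrow : ∀ i : Nat, i < datas.length → (datas.getD i []).length ≤ (labels.getD i []).length)
    (hidx : ∀ i ∈ idx, 0 ≤ i ∧ i < (datas.length : Int)) :
    (PySem.List.pyRange 0 (((idx.map (fun i => PySem.List.pyGetD datas i [])).length : Nat) : Int) 1).foldl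
      (fun pp j =>
        (PySem.List.pyRange 0 ((PySem.List.pyGetD (idx.map (fun i => PySem.List.pyGetD datas i [])) j []).length : Int) 1).foldl
          (fun pp k =>
            (pp.1 ++ [PySem.List.pyGetD (PySem.List.pyGetD (idx.map (fun i => PySem.List.pyGetD datas i [])) j []) k 0],
             pp.2 ++ [PySem.List.pyGetD (PySem.List.pyGetD (idx.map (fun i => PySem.List.pyGetD labels i [])) j []) k 0])) pp)
      ([], [])
    = (idx.flatMap (fun i => PySem.List.pyGetD datas i []),
       idx.flatMap (fun i => (PySem.List.pyGetD labels i []).take (PySem.List.pyGetD datas i []).length)) := by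
  rw [List.length_map]
  rw [PySem.List.foldl_congr_mem _ _
      (fun pp j =>
        (pp.1 ++ PySem.List.pyGetD datas (PySem.List.pyGetD idx j 0) [],
         pp.2 ++ (PySem.List.pyGetD labels (PySem.List.pyGetD idx j 0) []).take
            (PySem.List.pyGetD datas (PySem.List.pyGetD idx j 0) []).length)) _ ?_]
  · rw [PySem.List.foldl_pyRange_zero_pyGetD' idx 0
        (fun (pp : List Int × List Int) v =>
          (pp.1 ++ PySem.List.pyGetD datas v [],
           pp.2 ++ (PySem.List.pyGetD labels v []).take (PySem.List.pyGetD datas v []).length)) ([], [])]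
    exact pv_fold_pairs _ _ _
  · intro pp j hj
    have hjb : 0 ≤ j ∧ j < (idx.length : Int) := PySem.List.mem_pyRange_one.mp hj
    have h1 : PySem.List.pyGetD (idx.map (fun i => PySem.List.pyGetD datas i [])) j [] =
        PySem.List.pyGetD datas (PySem.List.pyGetD idx j 0) [] :=
      pv_pyGetD_map idx _ j [] 0 hjb.1 hjb.2
    have h2 : PySem.List.pyGetD (idx.map (fun i => PySem.List.pyGetD labels i [])) j [] =
        PySem.List.pyGetD labels (PySem.List.pyGetD idx j 0) [] :=
      pv_pyGetD_map idx _ j [] 0 hjb.1 hjb.2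
    rw [h1, h2]
    have hmem : PySem.List.pyGetD idx j 0 ∈ idx := by
      rw [PySem.List.pyGetD_eq_getElem idx 0 hjb.1 hjb.2]
      exact List.getElem_mem _
    exact pv_inner_flatten _ _ pp
      (pv_row_le datas labels hrow _ (hidx _ hmem).1 (hidx _ hmem).2)

theorem pv_A_eq (P : Int) (datas labels : List (List Int)) (hP : 0 < P)
    (hPn : P ≤ (datas.length : Int))
    (hmod : ∀ i : Nat, i < datas.length → P ≤ (i : Int) → PySem.Int.mod (i : Int) 15 < P)
    (hrow : ∀ i : Nat, i < datas.length → (datas.getD i []).length ≤ (labels.getD i []).length) :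
    data_to_people P datas labels =
      ((PySem.List.pyRange 0 P 1).map (fun q =>
          (q :: (PySem.List.pyRange P (datas.length : Int) 1).filter (fun i => PySem.Int.mod i 15 == q)).flatMap
            (fun i => PySem.List.pyGetD datas i [])),
       (PySem.List.pyRange 0 P 1).map (fun q =>
          (q :: (PySem.List.pyRange P (datas.length : Int) 1).filter (fun i => PySem.Int.mod i 15 == q)).flatMap
            (fun i => (PySem.List.pyGetD labels i []).take (PySem.List.pyGetD datas i []).length))) := by
  have hs1 : (PySem.List.pyRange 0 (datas.length : Int) 1).foldl (fun st i =>
      if i < P then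
        (st.1 ++ [[PySem.List.pyGetD datas i []]], st.2 ++ [[PySem.List.pyGetD labels i []]])
      else
        (st.1.modify (i.toNat % 15) (fun c => c ++ [PySem.List.pyGetD datas i []]),
         st.2.modify (i.toNat % 15) (fun c => c ++ [PySem.List.pyGetD labels i []])))
      ([], []) =
      ((PySem.List.pyRange 0 P 1).map (fun q =>
          (q :: (PySem.List.pyRange P (datas.length : Int) 1).filter (fun j => PySem.Int.mod j 15 == q)).map
            (fun j => PySem.List.pyGetD datas j [])),
       (PySem.List.pyRange 0 P 1).map (fun q =>
          (q :: (PySem.List.pyRange P (datas.length : Int) 1).filter (fun j => PySem.Int.mod j 15 == q)).map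
            (fun j => PySem.List.pyGetD labels j []))) := by
    rw [PySem.List.pyRange_one_append 0 P (datas.length : Int) hP.le hPn, List.foldl_append]
    rw [PySem.List.foldl_congr_mem (PySem.List.pyRange 0 P 1)
        (fun (st : List (List (List Int)) × List (List (List Int))) i =>
          if i < P then
            (st.1 ++ [[PySem.List.pyGetD datas i []]], st.2 ++ [[PySem.List.pyGetD labels i []]])
          else
            (st.1.modify (i.toNat % 15) (fun c => c ++ [PySem.List.pyGetD datas i []]),
             st.2.modify (i.toNat % 15) (fun c => c ++ [PySem.List.pyGetD labels i []])))
        (fun (st : List (List (List Int)) × List (List (List Int))) i =>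
          (st.1 ++ [[PySem.List.pyGetD datas i []]], st.2 ++ [[PySem.List.pyGetD labels i []]]))
        ([], []) (fun acc i hi => if_pos (PySem.List.mem_pyRange_one.mp hi).2)]
    rw [PySem.List.foldl_prod_mk (f := fun a i => a ++ [[PySem.List.pyGetD datas i []]])
        (g := fun a i => a ++ [[PySem.List.pyGetD labels i []]]),
        PySem.List.foldl_append_singleton_eq_map, PySem.List.foldl_append_singleton_eq_map,
        List.nil_append, List.nil_append]
    rw [PySem.List.foldl_congr_mem (PySem.List.pyRange P (datas.length : Int) 1)
        (fun (st : List (List (List Int)) × List (List (List Int))) i =>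
          if i < P then
            (st.1 ++ [[PySem.List.pyGetD datas i []]], st.2 ++ [[PySem.List.pyGetD labels i []]])
          else
            (st.1.modify (i.toNat % 15) (fun c => c ++ [PySem.List.pyGetD datas i []]),
             st.2.modify (i.toNat % 15) (fun c => c ++ [PySem.List.pyGetD labels i []])))
        (fun (st : List (List (List Int)) × List (List (List Int))) i =>
          (st.1.modify (i.toNat % 15) (fun c => c ++ [PySem.List.pyGetD datas i []]),
           st.2.modify (i.toNat % 15) (fun c => c ++ [PySem.List.pyGetD labels i []])))
        _ (fun acc i hi => if_neg (by have := PySem.List.mem_pyRange_one.mp hi; omega))]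
    rw [PySem.List.foldl_prod_mk
        (f := fun (l : List (List (List Int))) i => l.modify (i.toNat % 15) (fun c => c ++ [PySem.List.pyGetD datas i []]))
        (g := fun (l : List (List (List Int))) i => l.modify (i.toNat % 15) (fun c => c ++ [PySem.List.pyGetD labels i []]))]
    rw [pv_phase2 datas P hP datas.length hPn hmod, pv_phase2 labels P hP datas.length hPn hmod]
  simp only [data_to_people]
  rw [hs1]
  rw [PySem.List.foldl_congr_mem (PySem.List.pyRange 0 P 1) _
      (fun out i =>
        (out.1 ++ [(i :: (PySem.List.pyRange P (datas.length : Int) 1).filter (fun j => PySem.Int.mod j 15 == i)).flatMap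
            (fun j => PySem.List.pyGetD datas j [])],
         out.2 ++ [(i :: (PySem.List.pyRange P (datas.length : Int) 1).filter (fun j => PySem.Int.mod j 15 == i)).flatMap
            (fun j => (PySem.List.pyGetD labels j []).take (PySem.List.pyGetD datas j []).length)]))
      ([], []) ?_]
  · rw [PySem.List.foldl_prod_mk
        (f := fun a i => a ++ [(i :: (PySem.List.pyRange P (datas.length : Int) 1).filter (fun j => PySem.Int.mod j 15 == i)).flatMap
            (fun j => PySem.List.pyGetD datas j [])])
        (g := fun a i => a ++ [(i :: (PySem.List.pyRange P (datas.length : Int) 1).filter (fun j => PySem.Int.mod j 15 == i)).flatMap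
            (fun j => (PySem.List.pyGetD labels j []).take (PySem.List.pyGetD datas j []).length)]),
        PySem.List.foldl_append_singleton_eq_map, PySem.List.foldl_append_singleton_eq_map,
        List.nil_append, List.nil_append]
  · intro acc i hi
    have hib : 0 ≤ i ∧ i < P := PySem.List.mem_pyRange_one.mp hi
    have hcd := PySem.List.pyGetD_map_pyRange_of_nonneg
        (fun q => (q :: (PySem.List.pyRange P (datas.length : Int) 1).filter (fun j => PySem.Int.mod j 15 == q)).map
            (fun j => PySem.List.pyGetD datas j [])) P i [] hib.1 hib.2
    have hcl := PySem.List.pyGetD_map_pyRange_of_nonneg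
        (fun q => (q :: (PySem.List.pyRange P (datas.length : Int) 1).filter (fun j => PySem.Int.mod j 15 == q)).map
            (fun j => PySem.List.pyGetD labels j [])) P i [] hib.1 hib.2
    rw [hcd, hcl]
    have hidx : ∀ j ∈ (i :: (PySem.List.pyRange P (datas.length : Int) 1).filter (fun j => PySem.Int.mod j 15 == i)),
        0 ≤ j ∧ j < (datas.length : Int) := by
      intro j hj
      rcases List.mem_cons.mp hj with h | h
      · omega
      · have := PySem.List.mem_pyRange_one.mp (List.mem_of_mem_filter h)
        omega
    rw [pv_chunks_flatten datas labels _ hrow hidx]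

-- ===== VERDICT (by name: the statement is the Claim_ definition above) =====
theorem data_to_people_spec : Claim_equal_data_to_people := by
  intro P datas labels _ hpre
  obtain ⟨hPn, hll, hmod, hrow⟩ := hpre
  unfold Spec_data_to_people
  by_cases hP : 0 < P
  · rw [pv_A_eq P datas labels hP hPn hmod hrow]
    simp only [data_to_people_alt, List.map_map]
    refine Prod.ext ?_ ?_ <;>
      · refine (List.map_congr_left ?_).symm
        intro p hp
        have hpb : 0 ≤ p ∧ p < P := PySem.List.mem_pyRange_one.mp hp
        rw [Function.comp_apply,
          pv_person_eq P datas labels p hP.le hpb.1 hrow (by omega)]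
  · have hn : datas.length = 0 := by
      by_contra h
      have h0 : 0 < datas.length := Nat.pos_of_ne_zero h
      have hm := hmod 0 h0 (by simp; omega)
      have h15 : PySem.Int.mod ((0 : Nat) : Int) 15 = 0 := by decide
      rw [h15] at hm
      omega
    have hd : datas = [] := List.length_eq_zero_iff.mp hn
    subst hd
    simp [data_to_people, data_to_people_alt,
      PySem.List.pyRange_one_eq_nil (le_of_not_gt hP)]
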